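-- pv_equiv track=rewrite | github.com/Gappu824/Bajaj-HachRX_Hustlers | app/core/smart_chunker.py | _chunk_spreadsheet
-- ===== SOURCE A (Python) =====
-- from typing import List, Tuple, Dict
--
-- def _chunk_spreadsheet(text: str, metadata: List[Dict]) -> Tuple[List[str], List[Dict]]:
--     """Special chunking for spreadsheets"""
--     chunks = []
--     chunk_metadata = []
--
--     lines = text.split('\n')
--
--     # Extract headers and summary
--     header_lines = []
--     data_lines = []
--     current_section = 'header'
--
--     for line in lines:
--         if '=== DATA ROWS ===' in line:
--             current_section = 'data'
--         elif current_section == 'header' or line.startswith('Column Headers:'):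
--             header_lines.append(line)
--         else:
--             data_lines.append(line)
--
--     # Create header context
--     header_context = '\n'.join(header_lines)
--
--     # Chunk data rows with header context
--     chunk_size = 20  # rows per chunk
--     current_chunk = []
--
--     for i, line in enumerate(data_lines):
--         if line.startswith('Row '):
--             current_chunk.append(line)
--
--             if len(current_chunk) >= chunk_size:
--                 # Create chunk with header
--                 chunk_text = header_context + '\n\n' + '\n'.join(current_chunk)
--                 chunks.append(chunk_text)
--                 chunk_metadata.append({
--                     'type': 'spreadsheet_chunk',
--                     'rows': len(current_chunk)
--                 })
--                 current_chunk = []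
--
--     # Add remaining
--     if current_chunk:
--         chunk_text = header_context + '\n\n' + '\n'.join(current_chunk)
--         chunks.append(chunk_text)
--         chunk_metadata.append({
--             'type': 'spreadsheet_chunk',
--             'rows': len(current_chunk)
--         })
--
--     return chunks, chunk_metadata
-- ===== SOURCE B (Python) =====
-- from typing import List, Tuple, Dict
--
-- def _chunk_spreadsheet(text: str, metadata: List[Dict]) -> Tuple[List[str], List[Dict]]:
--     """Special chunking for spreadsheets: filter row lines once, then peel off groups of 20."""
--     lines = text.split('\n')
--
--     header_lines = []
--     data_lines = []
--     current_section = 'header'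
--     for line in lines:
--         if '=== DATA ROWS ===' in line:
--             current_section = 'data'
--         elif current_section == 'header' or line.startswith('Column Headers:'):
--             header_lines.append(line)
--         else:
--             data_lines.append(line)
--
--     header_context = '\n'.join(header_lines)
--
--     rows = [l for l in data_lines if l.startswith('Row ')]
--
--     chunks = []
--     chunk_metadata = []
--     while rows:
--         group, rows = rows[:20], rows[20:]
--         chunks.append(header_context + '\n\n' + '\n'.join(group))
--         chunk_metadata.append({'type': 'spreadsheet_chunk', 'rows': len(group)})
--     return chunks, chunk_metadata
-- ===== Notes on version B (the rewrite author's own statement) =====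
-- stated objective: simpler
-- what changed: The accumulate-and-flush batching loop with its trailing remainder branch is replaced by filtering the 'Row ' lines once and then peeling slices of 20 off the front, so the partial last group needs no special case.
import Mathlib
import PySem

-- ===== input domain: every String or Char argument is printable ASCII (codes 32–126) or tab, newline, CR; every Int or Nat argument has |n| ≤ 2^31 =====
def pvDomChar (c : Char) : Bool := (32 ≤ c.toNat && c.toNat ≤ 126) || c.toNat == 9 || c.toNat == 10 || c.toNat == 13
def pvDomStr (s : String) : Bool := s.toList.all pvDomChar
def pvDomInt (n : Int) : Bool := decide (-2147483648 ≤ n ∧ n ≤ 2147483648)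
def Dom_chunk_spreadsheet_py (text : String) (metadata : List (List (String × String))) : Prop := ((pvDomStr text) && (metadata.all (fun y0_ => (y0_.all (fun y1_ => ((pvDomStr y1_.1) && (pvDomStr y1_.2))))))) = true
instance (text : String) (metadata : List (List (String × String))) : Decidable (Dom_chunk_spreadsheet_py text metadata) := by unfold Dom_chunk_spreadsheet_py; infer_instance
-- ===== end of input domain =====

-- B replaces A's accumulate-and-flush batching (with its trailing remainder branch) by
-- filtering the 'Row ' lines once and peeling groups of 20 off the front: simpler decomposition, same values.


-- ===== PORT A =====
-- A's first loop: split lines into header_lines / data_lines, toggling on '=== DATA ROWS ==='.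
def pvAstep (st : List String × List String × String) (line : String) :
    List String × List String × String :=
  if PySem.Str.isIn "=== DATA ROWS ===" line then (st.1, st.2.1, "data")
  else if st.2.2 == "header" || PySem.Str.startswith line "Column Headers:" then
    (st.1 ++ [line], st.2.1, st.2.2)
  else (st.1, st.2.1 ++ [line], st.2.2)

-- A's second loop body: accumulate 'Row ' lines, flush a chunk when 20 are collected.
def pvAdata (hdr : String)
    (st : List String × List (List (String × String)) × List String) (p : Int × String) :
    List String × List (List (String × String)) × List String :=
  if PySem.Str.startswith p.2 "Row " then
    let cur' := st.2.2 ++ [p.2]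
    if 20 ≤ cur'.length then
      (st.1 ++ [hdr ++ "\n\n" ++ PySem.Str.join "\n" cur'],
       st.2.1 ++ [[("type", "spreadsheet_chunk"), ("rows", PySem.Int.toStr (cur'.length : Int))]],
       [])
    else (st.1, st.2.1, cur')
  else st

def chunk_spreadsheet_py (text : String) (metadata : List (List (String × String))) :
    List String × (List (List (String × String))) :=
  -- text.split('\n'): the separator is a nonempty literal, so split? is `some` here
  let lines := (PySem.Str.split? text "\n").getD []
  let st := lines.foldl pvAstep ([], [], "header")
  let headerContext := PySem.Str.join "\n" st.1
  let fin := (PySem.List.enumerate st.2.1 0).foldl (pvAdata headerContext) ([], [], [])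
  -- trailing 'if current_chunk:' remainder flush
  if fin.2.2 ≠ [] then
    (fin.1 ++ [headerContext ++ "\n\n" ++ PySem.Str.join "\n" fin.2.2],
     fin.2.1 ++ [[("type", "spreadsheet_chunk"), ("rows", PySem.Int.toStr (fin.2.2.length : Int))]])
  else (fin.1, fin.2.1)

-- ===== PORT B =====
-- B's first loop (same as A's first pass, transliterated from Source B).
def pvBstep (st : List String × List String × String) (line : String) :
    List String × List String × String :=
  if PySem.Str.isIn "=== DATA ROWS ===" line then (st.1, st.2.1, "data")
  else if st.2.2 == "header" || PySem.Str.startswith line "Column Headers:" then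
    (st.1 ++ [line], st.2.1, st.2.2)
  else (st.1, st.2.1 ++ [line], st.2.2)

-- B's 'while rows:' loop: peel rows[:20] / rows[20:] off the front.
def pvBloop (hdr : String) :
    List String → List String → List (List (String × String)) →
    List String × List (List (String × String))
  | [], chunks, metas => (chunks, metas)
  | r :: rs, chunks, metas =>
      let group := PySem.List.slice (r :: rs) none (some 20)
      let rest := PySem.List.slice (r :: rs) (some 20) none
      pvBloop hdr rest
        (chunks ++ [hdr ++ "\n\n" ++ PySem.Str.join "\n" group])
        (metas ++ [[("type", "spreadsheet_chunk"), ("rows", PySem.Int.toStr (group.length : Int))]])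
  termination_by rows _ _ => rows.length
  decreasing_by
    rw [PySem.List.slice_from (r :: rs) (by norm_num)]
    simp

def chunk_spreadsheet_py_alt (text : String) (metadata : List (List (String × String))) :
    List String × (List (List (String × String))) :=
  -- text.split('\n'): the separator is a nonempty literal, so split? is `some` here
  let lines := (PySem.Str.split? text "\n").getD []
  let st := lines.foldl pvBstep ([], [], "header")
  let headerContext := PySem.Str.join "\n" st.1
  let rows := st.2.1.filter (fun l => PySem.Str.startswith l "Row ")
  pvBloop headerContext rows [] []

-- ===== PRECONDITION & SPEC =====
def Spec_chunk_spreadsheet_py (text : String) (metadata : List (List (String × String))) (out : List String × (List (List (String × String)))) : Prop := out = chunk_spreadsheet_py_alt text metadata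
instance (text : String) (metadata : List (List (String × String))) (out : List String × (List (List (String × String)))) : Decidable (Spec_chunk_spreadsheet_py text metadata out) := by unfold Spec_chunk_spreadsheet_py; infer_instance

-- ===== CLAIM (what is proved, stated in full; the proofs are below) =====
def Claim_equal_chunk_spreadsheet_py : Prop := ∀ (text : String) (metadata : List (List (String × String))), Dom_chunk_spreadsheet_py text metadata → Spec_chunk_spreadsheet_py text metadata (chunk_spreadsheet_py text metadata)

-- ===== LEMMAS AND PROOFS =====
-- A's flush step with the 'Row ' guard stripped off (what remains after folding over the filtered lines).
def pvAflush (hdr : String)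
    (st : List String × List (List (String × String)) × List String) (line : String) :
    List String × List (List (String × String)) × List String :=
  let cur' := st.2.2 ++ [line]
  if 20 ≤ cur'.length then
    (st.1 ++ [hdr ++ "\n\n" ++ PySem.Str.join "\n" cur'],
     st.2.1 ++ [[("type", "spreadsheet_chunk"), ("rows", PySem.Int.toStr (cur'.length : Int))]],
     [])
  else (st.1, st.2.1, cur')

-- A's trailing remainder flush.
def pvAfinal (hdr : String)
    (fin : List String × List (List (String × String)) × List String) :
    List String × List (List (String × String)) :=
  if fin.2.2 ≠ [] then
    (fin.1 ++ [hdr ++ "\n\n" ++ PySem.Str.join "\n" fin.2.2],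
     fin.2.1 ++ [[("type", "spreadsheet_chunk"), ("rows", PySem.Int.toStr (fin.2.2.length : Int))]])
  else (fin.1, fin.2.1)

theorem pvBstep_eq_pvAstep : pvBstep = pvAstep := rfl

-- one step of B's loop on any nonempty row list, with the slices rewritten to take/drop
theorem pvBloop_cons_eq (hdr : String) (xs : List String) (hxs : xs ≠ [])
    (chunks : List String) (metas : List (List (String × String))) :
    pvBloop hdr xs chunks metas =
      pvBloop hdr (xs.drop 20)
        (chunks ++ [hdr ++ "\n\n" ++ PySem.Str.join "\n" (xs.take 20)])
        (metas ++ [[("type", "spreadsheet_chunk"),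
                   ("rows", PySem.Int.toStr ((xs.take 20).length : Int))]]) := by
  cases xs with
  | nil => exact absurd rfl hxs
  | cons r rs =>
      rw [pvBloop]
      rw [PySem.List.slice_to (r :: rs) (by norm_num), PySem.List.slice_from (r :: rs) (by norm_num)]
      simp only [Int.reduceToNat]

-- the heart of the equivalence: accumulate-and-flush over `rows` starting from a partial
-- batch `cur` (fewer than 20 lines), followed by the remainder flush, equals B's
-- peel-groups-of-20 loop run on `cur ++ rows`.
theorem pvFlush_eq_bloop (hdr : String) (rows : List String) :
    ∀ (cur : List String) (cs : List String) (ms : List (List (String × String))),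
      cur.length < 20 →
      pvAfinal hdr (rows.foldl (pvAflush hdr) (cs, ms, cur)) = pvBloop hdr (cur ++ rows) cs ms := by
  induction rows with
  | nil =>
      intro cur cs ms hcur
      simp only [List.foldl_nil, List.append_nil]
      cases cur with
      | nil => simp [pvAfinal, pvBloop]
      | cons c cur' =>
          rw [pvBloop_cons_eq hdr _ (by simp)]
          rw [List.take_of_length_le (by omega), List.drop_eq_nil_of_le (by omega)]
          simp [pvAfinal, pvBloop]
  | cons l rest ih =>
      intro cur cs ms hcur
      simp only [List.foldl_cons]
      by_cases hlen : 20 ≤ (cur ++ [l]).length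
      · have h20 : (cur ++ [l]).length = 20 := by
          simp only [List.length_append, List.length_cons, List.length_nil] at hlen ⊢; omega
        have hstep : pvAflush hdr (cs, ms, cur) l =
              (cs ++ [hdr ++ "\n\n" ++ PySem.Str.join "\n" (cur ++ [l])],
               ms ++ [[("type", "spreadsheet_chunk"),
                       ("rows", PySem.Int.toStr (((cur ++ [l]).length : Nat) : Int))]],
               []) := by
          simp only [pvAflush]
          rw [if_pos hlen]
        rw [hstep, ih [] _ _ (by norm_num)]
        rw [pvBloop_cons_eq hdr (cur ++ l :: rest) (by simp)]
        have hsplit : cur ++ l :: rest = (cur ++ [l]) ++ rest := by simp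
        rw [hsplit, ← h20, List.take_left, List.drop_left]
        simp
      · have hstep : pvAflush hdr (cs, ms, cur) l = (cs, ms, cur ++ [l]) := by
          simp only [pvAflush]
          rw [if_neg hlen]
        rw [hstep, ih (cur ++ [l]) cs ms
          (by simp only [List.length_append, List.length_cons, List.length_nil] at hlen ⊢; omega)]
        simp

-- A's whole second phase (on the already split-out data lines) equals B's filter-then-peel phase.
theorem pvA_eq_B (hdr : String) (dl : List String) :
    pvAfinal hdr ((PySem.List.enumerate dl 0).foldl (pvAdata hdr) ([], [], [])) =
    pvBloop hdr (dl.filter (fun l => PySem.Str.startswith l "Row ")) [] [] := by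
  have henum : (PySem.List.enumerate dl 0).foldl (pvAdata hdr) ([], [], []) =
      (dl.filter (fun l => PySem.Str.startswith l "Row ")).foldl (pvAflush hdr) ([], [], []) := by
    calc (PySem.List.enumerate dl 0).foldl (pvAdata hdr) ([], [], [])
        = ((PySem.List.enumerate dl 0).map (fun x => x.2)).foldl
            (fun acc l => if PySem.Str.startswith l "Row " then pvAflush hdr acc l else acc)
            ([], [], []) := by
          rw [List.foldl_map]
          apply List.foldl_ext
          intro b a _
          by_cases h : PySem.Str.startswith a.2 "Row "
          · simp [pvAdata, pvAflush, h]
          · simp [pvAdata, pvAflush, h]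
      _ = (dl.filter (fun l => PySem.Str.startswith l "Row ")).foldl (pvAflush hdr)
            ([], [], []) := by
          rw [PySem.List.map_snd_enumerate, List.foldl_filter]
  rw [henum]
  simpa using pvFlush_eq_bloop hdr _ [] [] [] (by norm_num)

-- ===== VERDICT (by name: the statement is the Claim_ definition above) =====
theorem chunk_spreadsheet_py_spec : Claim_equal_chunk_spreadsheet_py := by
  intro text metadata _
  unfold Spec_chunk_spreadsheet_py chunk_spreadsheet_py chunk_spreadsheet_py_alt
  dsimp only
  rw [pvBstep_eq_pvAstep]
  exact pvA_eq_B _ _
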